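-- pv_equiv track=rewrite | github.com/EddyTheAnimator1/Rec-Room-Patches | test_2016_patches.py | mask_command
-- ===== SOURCE A (Python) =====
-- def mask_command(args: list[str]) -> str:
--     masked: list[str] = []
--     hide_next = False
--     sensitive_flags = {"-password", "-username", "-twofactor"}
--     for part in args:
--         if hide_next:
--             masked.append("<hidden>")
--             hide_next = False
--             continue
--         masked.append(part)
--         if part in sensitive_flags:
--             hide_next = True
--     return " ".join(masked)
-- ===== SOURCE B (Python) =====
-- def mask_command(args: list[str]) -> str:
--     # Chunk-based rewrite: repeatedly search for the next sensitive flag, copy the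
--     # untouched span before and including it, then replace its value and continue.
--     sensitive_flags = {"-password", "-username", "-twofactor"}
--     out: list[str] = []
--     rest = args
--     while True:
--         idx = next((i for i, t in enumerate(rest) if t in sensitive_flags), None)
--         if idx is None:
--             out.extend(rest)
--             break
--         out.extend(rest[:idx + 1])
--         if idx + 1 < len(rest):
--             out.append("<hidden>")
--         rest = rest[idx + 2:]
--     return " ".join(out)
-- ===== Notes on version B (the rewrite author's own statement) =====
-- stated objective: alternative
-- what changed: Replaced A's per-token hide_next state machine with a chunk-based rewrite that repeatedly searches for the next sensitive flag, copies the untouched span up to and including it, appends '<hidden>' for its value and continues after the consumed pair.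
import Mathlib
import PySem

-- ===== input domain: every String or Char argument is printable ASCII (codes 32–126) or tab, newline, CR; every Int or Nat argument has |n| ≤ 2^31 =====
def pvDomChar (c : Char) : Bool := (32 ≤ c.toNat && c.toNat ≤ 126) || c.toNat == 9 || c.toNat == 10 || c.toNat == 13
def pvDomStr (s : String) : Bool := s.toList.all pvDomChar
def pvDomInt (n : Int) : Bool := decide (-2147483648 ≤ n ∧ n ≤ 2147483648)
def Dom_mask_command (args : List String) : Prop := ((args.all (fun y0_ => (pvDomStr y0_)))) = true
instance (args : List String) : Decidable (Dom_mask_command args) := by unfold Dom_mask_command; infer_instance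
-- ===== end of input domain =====

-- B replaces A's per-token hide_next state machine with a chunk-based rewrite that searches
-- for the next sensitive flag, copies the untouched span, masks its value and continues
-- (objective: alternative decomposition).

-- ===== PORT A =====
def sensitiveFlags : PySem.Set String :=
  PySem.Set.ofList ["-password", "-username", "-twofactor"]

-- the for-loop of A, state = hide_next carried to the next iteration
def maskLoopA : List String → Bool → List String
  | [], _ => []
  | _ :: rest, true => "<hidden>" :: maskLoopA rest false
  | p :: rest, false => p :: maskLoopA rest (decide (p ∈ sensitiveFlags))

def mask_command (args : List String) : String :=
  PySem.Str.join " " (maskLoopA args false)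

-- ===== PORT B =====
-- Source B's 'next((i for i, t in enumerate(rest) if t in sensitive_flags), None)'
def findFlagIdx : List String → Option Nat
  | [] => none
  | t :: rest =>
    if t ∈ sensitiveFlags then some 0 else (findFlagIdx rest).map (· + 1)

theorem findFlagIdx_lt (l : List String) (i : Nat) (h : findFlagIdx l = some i) :
    i < l.length := by
  induction l generalizing i with
  | nil => simp [findFlagIdx] at h
  | cons t rest ih =>
    simp only [findFlagIdx] at h
    split at h
    · cases h; simp
    · cases hr : findFlagIdx rest with
      | none => simp [hr] at h
      | some j =>
        simp [hr] at h
        subst h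
        have := ih j hr
        simp; omega

-- Source B's while loop: copy spans up to and including each sensitive flag, mask its value
def maskChunks (rest : List String) : List String :=
  match h : findFlagIdx rest with
  | none => rest
  | some i =>
    rest.take (i + 1)
      ++ (if i + 1 < rest.length then ["<hidden>"] else [])
      ++ maskChunks (rest.drop (i + 2))
termination_by rest.length
decreasing_by
  have := findFlagIdx_lt rest i h
  simp [List.length_drop]; omega

def mask_command_alt (args : List String) : String :=
  PySem.Str.join " " (maskChunks args)

-- ===== PRECONDITION & SPEC =====
def Spec_mask_command (args : List String) (out : String) : Prop := out = mask_command_alt args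
instance (args : List String) (out : String) : Decidable (Spec_mask_command args out) := by unfold Spec_mask_command; infer_instance

-- ===== CLAIM (what is proved, stated in full; the proofs are below) =====
def Claim_equal_mask_command : Prop := ∀ (args : List String), Dom_mask_command args → Spec_mask_command args (mask_command args)

-- ===== LEMMAS AND PROOFS =====
theorem maskChunks_eq (l : List String) :
    maskChunks l =
      (match findFlagIdx l with
       | none => l
       | some i =>
         l.take (i + 1)
           ++ (if i + 1 < l.length then ["<hidden>"] else [])
           ++ maskChunks (l.drop (i + 2))) := by
  rw [maskChunks]
  split <;> rename_i heq <;> simp [heq]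

theorem findFlagIdx_cons_notflag (t : String) (rest : List String) (h : t ∉ sensitiveFlags) :
    findFlagIdx (t :: rest) = (findFlagIdx rest).map (· + 1) := by
  simp [findFlagIdx, h]

theorem maskLoopA_eq_maskChunks : ∀ (l : List String), maskLoopA l false = maskChunks l
  | [] => by rw [maskChunks_eq]; simp [findFlagIdx, maskLoopA]
  | t :: rest => by
    by_cases h : t ∈ sensitiveFlags
    · have hf : findFlagIdx (t :: rest) = some 0 := by simp [findFlagIdx, h]
      rw [maskChunks_eq, hf]
      cases rest with
      | nil =>
        have h0 : maskChunks ([] : List String) = [] := by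
          rw [maskChunks_eq]; simp [findFlagIdx]
        simp [maskLoopA, h0]
      | cons v rest' =>
        have := maskLoopA_eq_maskChunks rest'
        simp [maskLoopA, h, this]
    · rw [maskChunks_eq, findFlagIdx_cons_notflag t rest h]
      cases hr : findFlagIdx rest with
      | none =>
        have := maskLoopA_eq_maskChunks rest
        rw [maskChunks_eq, hr] at this
        simp [maskLoopA, h, this]
      | some j =>
        have := maskLoopA_eq_maskChunks rest
        rw [maskChunks_eq, hr] at this
        simp only [Option.map, maskLoopA, h, decide_false, this]
        simp [List.take_succ_cons, List.drop_succ_cons]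
termination_by l => l.length
decreasing_by all_goals (simp; try omega)

-- ===== VERDICT (by name: the statement is the Claim_ definition above) =====
theorem mask_command_spec : Claim_equal_mask_command := by
  intro args _
  unfold Spec_mask_command mask_command mask_command_alt
  rw [maskLoopA_eq_maskChunks]
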